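-- pv_equiv track=rewrite | github.com/Sheshiyer/openclaw-memory-noesis | noesis/core/context.py | compress_content
-- ===== SOURCE A (Python) =====
-- def compress_content(content: str) -> str:
--     """
--     Pratyahara compression - remove redundant whitespace and comments.
--     """
--     lines = content.splitlines()
--     compressed = []
--     in_code_block = False
--
--     for line in lines:
--         # Track code blocks (don't compress them)
--         if line.strip().startswith("```"):
--             in_code_block = not in_code_block
--             compressed.append(line)
--             continue
--
--         if in_code_block:
--             compressed.append(line)
--             continue
--
--         # Skip empty lines and HTML comments
--         stripped = line.strip()
--         if not stripped:
--             continue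
--         if stripped.startswith("<!--") and stripped.endswith("-->"):
--             continue
--
--         # Keep the line
--         compressed.append(line)
--
--     return "\n".join(compressed)
-- ===== SOURCE B (Python) =====
-- def _keep(line):
--     s = line.strip()
--     return bool(s) and not (s.startswith("<!--") and s.endswith("-->"))
--
--
-- def compress_content(content: str) -> str:
--     # Pass 1: partition the lines into segments separated by fence lines
--     # (the fence lines are stored apart, in order).
--     lines = content.splitlines()
--     segs, fences, cur = [], [], []
--     for line in lines:
--         if line.strip().startswith("```"):
--             segs.append(cur)
--             fences.append(line)
--             cur = []
--         else:
--             cur.append(line)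
--     segs.append(cur)
--     # Pass 2: odd-indexed segments are inside code blocks and are kept
--     # verbatim; even-indexed segments are filtered; fences are always kept.
--     out = []
--     for i, seg in enumerate(segs):
--         out.extend(seg if i % 2 == 1 else [l for l in seg if _keep(l)])
--         if i < len(fences):
--             out.append(fences[i])
--     return "\n".join(out)
-- ===== Notes on version B (the rewrite author's own statement) =====
-- stated objective: alternative
-- what changed: Replaces the single stateful toggle loop with a partition-then-filter structure: a first pass splits the lines into segments at fence lines (fences stored apart), a second pass keeps odd-indexed (code) segments verbatim and filters blank/comment lines from even-indexed segments.
import Mathlib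
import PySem

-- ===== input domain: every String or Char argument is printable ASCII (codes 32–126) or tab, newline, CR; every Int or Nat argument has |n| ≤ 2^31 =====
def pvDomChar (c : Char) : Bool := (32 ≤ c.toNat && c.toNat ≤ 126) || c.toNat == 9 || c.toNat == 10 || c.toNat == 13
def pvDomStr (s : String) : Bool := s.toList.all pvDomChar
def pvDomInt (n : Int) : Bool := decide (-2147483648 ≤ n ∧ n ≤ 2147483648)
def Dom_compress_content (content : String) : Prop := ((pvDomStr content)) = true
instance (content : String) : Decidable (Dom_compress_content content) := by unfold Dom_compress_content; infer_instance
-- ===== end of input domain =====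

-- B replaces A's single stateful toggle loop with a partition (split lines at fence lines)
-- followed by a parity-indexed filter pass; same cost, different structure (objective: alternative).

-- ===== PORT A =====
-- loop body of A's for-loop, state = (compressed, in_code_block)
def pvStepA (st : List String × Bool) (line : String) : List String × Bool :=
  if PySem.Str.startswith (PySem.Str.strip line) "```" then (st.1 ++ [line], !st.2)
  else if st.2 then (st.1 ++ [line], st.2)
  else
    let stripped := PySem.Str.strip line
    if stripped == "" then st
    else if PySem.Str.startswith stripped "<!--" && PySem.Str.endswith stripped "-->" then st
    else (st.1 ++ [line], st.2)

def compress_content (content : String) : String :=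
  let lines := PySem.Str.splitlines content
  let st := lines.foldl pvStepA ([], false)
  PySem.Str.join "\n" st.1

-- ===== PORT B =====
-- _keep of Source B
def pvKeep (line : String) : Bool :=
  let s := PySem.Str.strip line
  !(s == "") && !(PySem.Str.startswith s "<!--" && PySem.Str.endswith s "-->")

-- pass-1 loop body of Source B, state = (segs, fences, cur)
def pvStepB (st : List (List String) × List String × List String) (line : String) :
    List (List String) × List String × List String :=
  if PySem.Str.startswith (PySem.Str.strip line) "```" then
    (st.1 ++ [st.2.2], st.2.1 ++ [line], [])
  else (st.1, st.2.1, st.2.2 ++ [line])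

-- pass-2 loop body of Source B (`fences` fixed), accumulator = out
def pvStepOut (fences : List String) (out : List String) (p : Int × List String) :
    List String :=
  let out := out ++ (if PySem.Int.mod p.1 2 == 1 then p.2 else p.2.filter pvKeep)
  if p.1 < (fences.length : Int) then out ++ [PySem.List.pyGetD fences p.1 ""] else out

def compress_content_alt (content : String) : String :=
  let lines := PySem.Str.splitlines content
  let st := lines.foldl pvStepB ([], [], [])
  let segs := st.1 ++ [st.2.2]
  let fences := st.2.1
  let out := (PySem.List.enumerate segs).foldl (pvStepOut fences) []
  PySem.Str.join "\n" out

-- ===== PRECONDITION & SPEC =====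
def Spec_compress_content (content : String) (out : String) : Prop := out = compress_content_alt content
instance (content : String) (out : String) : Decidable (Spec_compress_content content out) := by unfold Spec_compress_content; infer_instance

-- ===== CLAIM (what is proved, stated in full; the proofs are below) =====
def Claim_equal_compress_content : Prop := ∀ (content : String), Dom_compress_content content → Spec_compress_content content (compress_content content)

-- ===== LEMMAS AND PROOFS =====

-- reference rendering: segments interleaved with the fences that separate them
def pvRender : Nat → List (List String) → List String → List String
  | _, [], _ => []
  | i, seg :: segs, fences =>
      (if i % 2 = 1 then seg else seg.filter pvKeep) ++
      (match fences with
       | [] => pvRender (i + 1) segs []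
       | f :: fs => f :: pvRender (i + 1) segs fs)

theorem pvRender_snoc_fence (segs : List (List String)) (fences : List String)
    (i : Nat) (h : fences.length = segs.length) (cur : List String) (f : String) :
    pvRender i (segs ++ [cur, []]) (fences ++ [f]) =
      pvRender i (segs ++ [cur]) fences ++ [f] := by
  induction segs generalizing fences i with
  | nil =>
    match fences, h with
    | [], _ => simp [pvRender]
  | cons s ss ih =>
    match fences, h with
    | g :: gs, h =>
      simp only [List.cons_append, pvRender, List.append_assoc]
      rw [ih gs (i + 1) (by simpa using h)]

theorem pvRender_last_append (segs : List (List String)) (fences : List String)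
    (i : Nat) (h : fences.length = segs.length) (cur : List String) (l : String) :
    pvRender i (segs ++ [cur ++ [l]]) fences =
      pvRender i (segs ++ [cur]) fences ++
        (if (i + segs.length) % 2 = 1 then [l] else if pvKeep l then [l] else []) := by
  induction segs generalizing fences i with
  | nil =>
    match fences, h with
    | [], _ =>
      simp only [List.nil_append, pvRender, List.length_nil, Nat.add_zero, List.append_nil]
      split_ifs with h1 h2 <;> simp_all [List.filter_append]
  | cons s ss ih =>
    match fences, h with
    | g :: gs, h =>
      simp only [List.cons_append, pvRender, List.append_assoc]
      rw [ih gs (i + 1) (by simpa using h)]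
      simp only [List.length_cons]
      have hi : i + 1 + ss.length = i + (ss.length + 1) := by omega
      rw [hi]
      rfl

-- main invariant: A's fold and B's first-pass fold, run from matching states, render the same
theorem pvInv (ls : List String) (segs : List (List String)) (fences cur : List String)
    (h : fences.length = segs.length) :
    (ls.foldl pvStepA
        (pvRender 0 (segs ++ [cur]) fences, decide (segs.length % 2 = 1))).1 =
      (let st := ls.foldl pvStepB (segs, fences, cur)
       pvRender 0 (st.1 ++ [st.2.2]) st.2.1) := by
  induction ls generalizing segs fences cur with
  | nil => simp
  | cons l ls ih =>
    simp only [List.foldl_cons]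
    by_cases hf : PySem.Str.startswith (PySem.Str.strip l) "```" = true
    · have hA : pvStepA (pvRender 0 (segs ++ [cur]) fences, decide (segs.length % 2 = 1)) l
          = (pvRender 0 (segs ++ [cur]) fences ++ [l], !decide (segs.length % 2 = 1)) := by
        simp only [pvStepA, hf, if_true]
      have hB : pvStepB (segs, fences, cur) l = (segs ++ [cur], fences ++ [l], []) := by
        simp only [pvStepB, hf, if_true]
      rw [hA, hB]
      have hlen : (fences ++ [l]).length = (segs ++ [cur]).length := by simp [h]
      have hr : pvRender 0 ((segs ++ [cur]) ++ [[]]) (fences ++ [l])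
          = pvRender 0 (segs ++ [cur]) fences ++ [l] := by
        have h2 := pvRender_snoc_fence segs fences 0 h cur l
        have : segs ++ [cur, ([] : List String)] = (segs ++ [cur]) ++ [[]] := by simp
        rw [this] at h2
        exact h2
      have hpar : decide ((segs ++ [cur]).length % 2 = 1) = !decide (segs.length % 2 = 1) := by
        simp only [List.length_append, List.length_cons, List.length_nil]
        by_cases hp : segs.length % 2 = 1 <;> simp [hp] <;> omega
      have := ih (segs ++ [cur]) (fences ++ [l]) [] hlen
      rw [hr, hpar] at this
      exact this
    · have hB : pvStepB (segs, fences, cur) l = (segs, fences, cur ++ [l]) := by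
        simp only [pvStepB, hf, if_false, Bool.false_eq_true]
      rw [hB]
      have key : pvStepA (pvRender 0 (segs ++ [cur]) fences, decide (segs.length % 2 = 1)) l
          = (pvRender 0 (segs ++ [cur ++ [l]]) fences, decide (segs.length % 2 = 1)) := by
        rw [pvRender_last_append segs fences 0 h cur l]
        simp only [pvStepA, hf, if_false, Bool.false_eq_true, Nat.zero_add]
        by_cases hc : segs.length % 2 = 1
        · simp only [hc, decide_true, if_true]
        · simp only [hc, decide_false, Bool.false_eq_true, if_false]
          by_cases he : (PySem.Str.strip l == "") = true
          · have hk : pvKeep l = false := by simp only [pvKeep, he, Bool.not_true,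
              Bool.false_and]
            simp only [he, if_true, hk, Bool.false_eq_true, if_false, List.append_nil]
          · by_cases hcm : (PySem.Str.startswith (PySem.Str.strip l) "<!--" &&
                PySem.Str.endswith (PySem.Str.strip l) "-->") = true
            · have hk : pvKeep l = false := by
                simp only [pvKeep, hcm, Bool.not_true, Bool.and_false]
              simp only [he, Bool.false_eq_true, if_false, hcm, if_true, hk,
                List.append_nil]
            · have hk : pvKeep l = true := by
                rw [Bool.not_eq_true] at hcm
                simp only [pvKeep, Bool.and_eq_true, Bool.not_eq_true']
                refine ⟨by simpa using he, ?_⟩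
                simpa using hcm
              simp only [he, Bool.false_eq_true, if_false, hcm, hk, if_true]
      rw [key]
      exact ih segs fences (cur ++ [l]) h

-- B's second pass computes pvRender
theorem pvEnumFold (fences : List String) (segs : List (List String)) (i : Nat)
    (acc : List String) :
    (PySem.List.enumerate segs (i : Int)).foldl (pvStepOut fences) acc =
      acc ++ pvRender i segs (fences.drop i) := by
  induction segs generalizing i acc with
  | nil => simp [PySem.List.enumerate_nil, pvRender]
  | cons s ss ih =>
    rw [PySem.List.enumerate_cons, List.foldl_cons]
    have hcast : ((i : Int) + 1) = ((i + 1 : Nat) : Int) := by push_cast; ring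
    rw [hcast, ih (i + 1)]
    have hmod : (PySem.Int.mod (i : Int) 2 == 1) = decide (i % 2 = 1) := by
      rw [show ((2 : Int) = ((2 : Nat) : Int)) from rfl, PySem.Int.mod_natCast]
      by_cases h : i % 2 = 1 <;> simp [h] <;> omega
    by_cases hlt : i < fences.length
    · have hdrop : fences.drop i = fences[i] :: fences.drop (i + 1) :=
        List.drop_eq_getElem_cons hlt
      have hget : PySem.List.pyGetD fences (i : Int) "" = fences[i] := by
        rw [PySem.List.pyGetD_natCast]
        simp [List.getD, hlt]
      simp only [pvStepOut, hmod, hget, pvRender, hdrop]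
      have hcond : ((i : Int) < (fences.length : Int)) = True := by
        simp; exact_mod_cast hlt
      simp only [hcond, if_true]
      by_cases h : i % 2 = 1
      · simp [h]
      · simp [h]
    · have hdrop : fences.drop i = [] := List.drop_eq_nil_of_le (by omega)
      have hcond : ¬ ((i : Int) < (fences.length : Int)) := by
        simp; exact_mod_cast Nat.le_of_not_lt hlt
      have hdrop1 : fences.drop (i + 1) = [] := List.drop_eq_nil_of_le (by omega)
      simp only [pvStepOut, hmod, hcond, if_false, pvRender, hdrop, hdrop1]
      by_cases h : i % 2 = 1
      · simp [h]
      · simp [h]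

-- ===== VERDICT (by name: the statement is the Claim_ definition above) =====
theorem compress_content_spec : Claim_equal_compress_content := by
  intro content _
  unfold Spec_compress_content
  show compress_content content = compress_content_alt content
  simp only [compress_content, compress_content_alt]
  have h := pvInv (PySem.Str.splitlines content) [] [] [] rfl
  simp only [List.nil_append, List.length_nil] at h
  have h2 := pvEnumFold ((PySem.Str.splitlines content).foldl pvStepB ([], [], [])).2.1
    (((PySem.Str.splitlines content).foldl pvStepB ([], [], [])).1 ++
      [((PySem.Str.splitlines content).foldl pvStepB ([], [], [])).2.2]) 0 []
  simp only [Nat.cast_zero, List.drop_zero, List.nil_append] at h2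
  rw [h2]
  exact congrArg (PySem.Str.join "\n") h
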